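-- pv_equiv track=rewrite | github.com/Szymon-Budziak/Introduction_to_Computer_Science_course_AGH | Section_4/section_4-exercise_10.py | is_there_at_least_one_0
-- ===== SOURCE A (Python) =====
-- def is_there_at_least_one_0(array):
--     result = 0
--     for i in range(len(array)):
--         for j in range(len(array)):
--             if array[i][j] == 0:
--                 result += 1
--                 break
--     for a in range(len(array)):
--         for b in range(len(array)):
--             if array[b][a] == 0:
--                 result += 1
--                 break
--     if result == 2*len(array):
--         return True
--     return False
-- ===== SOURCE B (Python) =====
-- def is_there_at_least_one_0(array):
--     n = len(array)
--     rows = set()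
--     cols = set()
--     for i in range(n):
--         for j in range(n):
--             if array[i][j] == 0:
--                 rows.add(i)
--                 cols.add(j)
--     return len(rows) == n and len(cols) == n
-- ===== Notes on version B (the rewrite author's own statement) =====
-- stated objective: simpler
-- what changed: Replaced A's two separate early-breaking counting passes (rows, then columns) and the 2*n counter comparison by a single full nested scan that records which row and column indices contain a zero in two sets and checks both sets have size n.
-- outside the precondition, e.g. on is_there_at_least_one_0([[1, 0], [0]]): A returns True, B raises IndexError
import Mathlib
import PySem

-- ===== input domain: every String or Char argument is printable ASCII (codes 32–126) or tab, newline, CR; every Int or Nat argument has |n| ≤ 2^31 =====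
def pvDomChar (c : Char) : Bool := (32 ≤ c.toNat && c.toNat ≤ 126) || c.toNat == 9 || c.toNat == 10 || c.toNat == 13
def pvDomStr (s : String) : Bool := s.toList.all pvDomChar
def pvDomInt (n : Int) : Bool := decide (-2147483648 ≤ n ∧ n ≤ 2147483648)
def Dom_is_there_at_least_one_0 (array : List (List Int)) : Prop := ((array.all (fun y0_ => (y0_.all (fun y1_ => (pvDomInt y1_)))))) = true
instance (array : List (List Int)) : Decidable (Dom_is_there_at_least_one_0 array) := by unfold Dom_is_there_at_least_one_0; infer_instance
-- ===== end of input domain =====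

-- B replaces A's two early-breaking counting passes by one full scan collecting zero-bearing
-- row/column indices in two sets and comparing their sizes to n (simpler decomposition, same cost).


-- array[i][j] (Nat indices; under Pre_ both indices are in range, so getD never takes its default)
def pvAt (array : List (List Int)) (i j : Nat) : Bool := (array.getD i []).getD j 1 == 0

-- ===== PORT A =====
-- each inner 'for … if …: result += 1; break' loop is the search 'does some index give a zero'
def is_there_at_least_one_0 (array : List (List Int)) : Bool :=
  let n := array.length
  let result :=
    (List.range n).foldl (fun r i =>
      if (List.range n).any (fun j => pvAt array i j) then r + 1 else r) 0
  let result :=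
    (List.range n).foldl (fun r a =>
      if (List.range n).any (fun b => pvAt array b a) then r + 1 else r) result
  if result = 2 * n then true else false

-- ===== PORT B =====
def is_there_at_least_one_0_alt (array : List (List Int)) : Bool :=
  let n := array.length
  let st :=
    (List.range n).foldl (fun (st : PySem.Set Nat × PySem.Set Nat) i =>
      (List.range n).foldl (fun st2 j =>
        if pvAt array i j then (PySem.Set.add st2.1 i, PySem.Set.add st2.2 j) else st2) st)
      (PySem.Set.empty, PySem.Set.empty)
  decide (st.1.length = n) && decide (st.2.length = n)

-- ===== PRECONDITION & SPEC =====
-- Pre_ excludes ragged matrices (some row shorter than len(array)): Python A raises IndexError on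
-- most of them, and where A's early break happens to skip the short spot and return, B's full scan
-- naturally raises IndexError, so those inputs are unmatchable.
def Pre_is_there_at_least_one_0 (array : List (List Int)) : Prop :=
  ∀ row ∈ array, array.length ≤ row.length
instance (array : List (List Int)) : Decidable (Pre_is_there_at_least_one_0 array) := by
  unfold Pre_is_there_at_least_one_0; infer_instance

def pvWitness_is_there_at_least_one_0 : List (List Int) := [[1, 0], [0, 5]]

def Spec_is_there_at_least_one_0 (array : List (List Int)) (out : Bool) : Prop := out = is_there_at_least_one_0_alt array
instance (array : List (List Int)) (out : Bool) : Decidable (Spec_is_there_at_least_one_0 array out) := by unfold Spec_is_there_at_least_one_0; infer_instance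

-- ===== CLAIM (what is proved, stated in full; the proofs are below) =====
def Claim_equal_is_there_at_least_one_0 : Prop := ∀ (array : List (List Int)), Dom_is_there_at_least_one_0 array → Pre_is_there_at_least_one_0 array → Spec_is_there_at_least_one_0 array (is_there_at_least_one_0 array)

-- ===== LEMMAS AND PROOFS =====

-- a counting foldl is countP
theorem pv_foldl_count {α : Type} (p : α → Bool) (l : List α) (a : Nat) :
    l.foldl (fun r x => if p x then r + 1 else r) a = a + l.countP p := by
  induction l generalizing a with
  | nil => simp
  | cons x t ih => by_cases h : p x <;> simp [h, ih] <;> omega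

-- B's inner loop (fixed row i): rows component
theorem pv_inner_mem1 (array : List (List Int)) (i : Nat) (js : List Nat)
    (st : PySem.Set Nat × PySem.Set Nat) (x : Nat) :
    x ∈ (js.foldl (fun st2 j =>
        if pvAt array i j then (PySem.Set.add st2.1 i, PySem.Set.add st2.2 j) else st2) st).1
      ↔ x ∈ st.1 ∨ (x = i ∧ js.any (fun j => pvAt array i j)) := by
  induction js generalizing st with
  | nil => simp
  | cons j t ih =>
    by_cases h : pvAt array i j <;> simp [h, ih, PySem.Set.mem_add] <;> tauto

-- B's inner loop (fixed row i): cols component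
theorem pv_inner_mem2 (array : List (List Int)) (i : Nat) (js : List Nat)
    (st : PySem.Set Nat × PySem.Set Nat) (y : Nat) :
    y ∈ (js.foldl (fun st2 j =>
        if pvAt array i j then (PySem.Set.add st2.1 i, PySem.Set.add st2.2 j) else st2) st).2
      ↔ y ∈ st.2 ∨ (y ∈ js ∧ pvAt array i y) := by
  induction js generalizing st with
  | nil => simp
  | cons j t ih =>
    by_cases h : pvAt array i j <;>
      simp [h, ih, PySem.Set.mem_add] <;>
      constructor <;> rintro (h' | ⟨h1, h2⟩) <;> try tauto
    · rcases h' with h' | rfl <;> tauto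
    · rcases h1 with rfl | h1 <;> tauto

-- B's inner loop preserves Nodup of both components
theorem pv_inner_nodup (array : List (List Int)) (i : Nat) (js : List Nat)
    (st : PySem.Set Nat × PySem.Set Nat) (h1 : st.1.Nodup) (h2 : st.2.Nodup) :
    (js.foldl (fun st2 j =>
        if pvAt array i j then (PySem.Set.add st2.1 i, PySem.Set.add st2.2 j) else st2) st).1.Nodup ∧
    (js.foldl (fun st2 j =>
        if pvAt array i j then (PySem.Set.add st2.1 i, PySem.Set.add st2.2 j) else st2) st).2.Nodup := by
  induction js generalizing st with
  | nil => exact ⟨h1, h2⟩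
  | cons j t ih =>
    by_cases h : pvAt array i j <;> simp only [List.foldl_cons, h, if_true]
    · exact ih _ (PySem.Set.nodup_add _ _ h1) (PySem.Set.nodup_add _ _ h2)
    · exact ih _ h1 h2

-- B's outer loop: rows component
theorem pv_outer_mem1 (array : List (List Int)) (n : Nat) (is : List Nat)
    (st : PySem.Set Nat × PySem.Set Nat) (x : Nat) :
    x ∈ (is.foldl (fun st i =>
        (List.range n).foldl (fun st2 j =>
          if pvAt array i j then (PySem.Set.add st2.1 i, PySem.Set.add st2.2 j) else st2) st) st).1
      ↔ x ∈ st.1 ∨ (x ∈ is ∧ (List.range n).any (fun j => pvAt array x j)) := by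
  induction is generalizing st with
  | nil => simp
  | cons i t ih =>
    simp only [List.foldl_cons, ih, pv_inner_mem1, List.mem_cons]
    constructor
    · rintro ((h | ⟨rfl, h⟩) | ⟨h1, h2⟩)
      · tauto
      · exact Or.inr ⟨Or.inl rfl, h⟩
      · exact Or.inr ⟨Or.inr h1, h2⟩
    · rintro (h | ⟨rfl | h1, h2⟩)
      · tauto
      · exact Or.inl (Or.inr ⟨rfl, h2⟩)
      · exact Or.inr ⟨h1, h2⟩

-- B's outer loop: cols component
theorem pv_outer_mem2 (array : List (List Int)) (n : Nat) (is : List Nat)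
    (st : PySem.Set Nat × PySem.Set Nat) (y : Nat) :
    y ∈ (is.foldl (fun st i =>
        (List.range n).foldl (fun st2 j =>
          if pvAt array i j then (PySem.Set.add st2.1 i, PySem.Set.add st2.2 j) else st2) st) st).2
      ↔ y ∈ st.2 ∨ (y ∈ List.range n ∧ is.any (fun i => pvAt array i y)) := by
  induction is generalizing st with
  | nil => simp
  | cons i t ih =>
    simp only [List.foldl_cons, ih, pv_inner_mem2, List.any_cons, Bool.or_eq_true]
    constructor
    · rintro ((h | ⟨h1, h2⟩) | ⟨h1, h2⟩)
      · tauto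
      · exact Or.inr ⟨h1, Or.inl h2⟩
      · exact Or.inr ⟨h1, Or.inr h2⟩
    · rintro (h | ⟨h1, h2 | h2⟩)
      · tauto
      · exact Or.inl (Or.inr ⟨h1, h2⟩)
      · exact Or.inr ⟨h1, h2⟩

-- B's outer loop preserves Nodup of both components
theorem pv_outer_nodup (array : List (List Int)) (n : Nat) (is : List Nat)
    (st : PySem.Set Nat × PySem.Set Nat) (h1 : st.1.Nodup) (h2 : st.2.Nodup) :
    (is.foldl (fun st i =>
        (List.range n).foldl (fun st2 j =>
          if pvAt array i j then (PySem.Set.add st2.1 i, PySem.Set.add st2.2 j) else st2) st) st).1.Nodup ∧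
    (is.foldl (fun st i =>
        (List.range n).foldl (fun st2 j =>
          if pvAt array i j then (PySem.Set.add st2.1 i, PySem.Set.add st2.2 j) else st2) st) st).2.Nodup := by
  induction is generalizing st with
  | nil => exact ⟨h1, h2⟩
  | cons i t ih =>
    simp only [List.foldl_cons]
    exact ih _ (pv_inner_nodup array i (List.range n) st h1 h2).1
            (pv_inner_nodup array i (List.range n) st h1 h2).2

-- a Nodup list whose members are exactly those of range n satisfying p has length (range n).countP p
theorem pv_len_eq_countP (n : Nat) (p : Nat → Bool) (l : List Nat) (hnd : l.Nodup)
    (hm : ∀ x, x ∈ l ↔ x ∈ List.range n ∧ p x) :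
    l.length = (List.range n).countP p := by
  rw [List.countP_eq_length_filter]
  exact List.Perm.length_eq <| (List.perm_ext_iff_of_nodup hnd
    ((List.nodup_range).filter _)).2 (fun x => by simp [hm x, List.mem_filter])

-- ===== VERDICT (by name: the statement is the Claim_ definition above) =====
-- endgame arithmetic: c1 + c2 = 2n with c1,c2 ≤ n iff both equal n
theorem pv_final (c1 c2 n : Nat) (h1 : c1 ≤ n) (h2 : c2 ≤ n) :
    (if 0 + c1 + c2 = 2 * n then true else false) = (decide (c1 = n) && decide (c2 = n)) := by
  by_cases a : c1 = n <;> by_cases b : c2 = n <;> simp [a, b] <;> omega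

theorem is_there_at_least_one_0_spec : Claim_equal_is_there_at_least_one_0 := by
  intro array _ _
  show is_there_at_least_one_0 array = is_there_at_least_one_0_alt array
  unfold is_there_at_least_one_0 is_there_at_least_one_0_alt
  simp only []
  rw [pv_foldl_count, pv_foldl_count]
  set n := array.length with hn
  set st := (List.range n).foldl (fun (st : PySem.Set Nat × PySem.Set Nat) i =>
      (List.range n).foldl (fun st2 j =>
        if pvAt array i j then (PySem.Set.add st2.1 i, PySem.Set.add st2.2 j) else st2) st)
      (PySem.Set.empty, PySem.Set.empty) with hst
  have hnd := pv_outer_nodup array n (List.range n) (PySem.Set.empty, PySem.Set.empty)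
      (by simp [PySem.Set.empty]) (by simp [PySem.Set.empty])
  have hl1 : st.1.length
      = (List.range n).countP (fun i => (List.range n).any (fun j => pvAt array i j)) := by
    refine pv_len_eq_countP n _ st.1 hnd.1 (fun x => ?_)
    rw [hst, pv_outer_mem1]
    simp [PySem.Set.empty, and_comm]
  have hl2 : st.2.length
      = (List.range n).countP (fun a => (List.range n).any (fun b => pvAt array b a)) := by
    refine pv_len_eq_countP n _ st.2 hnd.2 (fun y => ?_)
    rw [hst, pv_outer_mem2]
    simp [PySem.Set.empty, and_comm]
  rw [hl1, hl2]
  have hb : ∀ p : Nat → Bool, (List.range n).countP p ≤ n := fun p => by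
    simpa using List.countP_le_length (p := p) (l := List.range n)
  exact pv_final _ _ _ (hb _) (hb _)
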